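-- pv_equiv track=rewrite | github.com/LowellDennis/bt | abbrev.py | UniqueAbbreviation
-- ===== SOURCE A (Python) =====
-- def UniqueAbbreviation(items):
--   # Start with empty unique dictionary
--   unique = {}
--
--   # Check for empty list
--   if items != None:
--
--     # Loop through each item in the list
--     for item in items:
--
--       # Loop through characters in item
--       for i in range(0, len(item)):
--
--         # Get potential unique abbreviation
--         abbrev = item[0:i+1]
--
--         # See if it is in the dictionary
--         if abbrev in unique:
--
--           # See if it matches a full item name
--           if abbrev in items:
--             # It does, set it correctly
--             unique[abbrev] = abbrev
--           else:
--             # Set entry to None so it can be removed later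
--             unique[abbrev] = None
--
--
--         # If it is not in the dictionary, add it because it is unique so far
--         else: unique[abbrev] = item
--
--     # Remove items in dictionary with value of None
--     for key in [key for key in unique if unique[key] == None]: del unique[key]
--
--   # Return the dictionary of unique abbreviations
--   return unique
-- ===== SOURCE B (Python) =====
-- def UniqueAbbreviation(items):
--   # Sort-and-neighbour-LCP algorithm: sort the items; in sorted order, all items
--   # sharing a prefix are contiguous, so a prefix of an item is shared with another
--   # item exactly when one of its SORTED NEIGHBOURS shares it.  One sorting pass
--   # computes, per item, the longest prefix length shared with any other item; the
--   # dict is then emitted in first-encounter order without ever scanning the list.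
--   if items is None:
--     return {}
--   lst = list(items)
--   srt = sorted(lst)
--
--   def lcp(a, b):
--     # length of the longest common prefix of a and b
--     n = 0
--     for x, y in zip(a, b):
--       if x != y:
--         return n
--       n += 1
--     return n
--
--   # thr[s] = length of the longest prefix of s shared with some OTHER list element
--   thr = {}
--   for m, s in enumerate(srt):
--     t = 0
--     if m > 0:
--       t = max(t, lcp(s, srt[m - 1]))
--     if m + 1 < len(srt):
--       t = max(t, lcp(s, srt[m + 1]))
--     thr[s] = max(thr.get(s, 0), t)
--
--   names = set(lst)
--   seen = set()
--   result = {}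
--   for item in lst:
--     for j in range(1, len(item) + 1):
--       p = item[:j]
--       if p in seen:
--         continue
--       seen.add(p)
--       if j > thr[item]:
--         result[p] = item
--       elif p in names:
--         result[p] = p
--   return result
-- ===== Notes on version B (the rewrite author's own statement) =====
-- stated objective: faster
-- what changed: Replaces A's incremental dict overwrite-then-delete construction (which re-scans the whole list with 'abbrev in items' on every repeated prefix) by a sort-based algorithm: sort the items once, compute for each item the longest prefix it shares with a sorted neighbour (items sharing a prefix are contiguous after sorting), then emit each distinct prefix in first-encounter order, keeping it iff its length exceeds that neighbour-LCP threshold (unique) or it is itself a full item name.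
import Mathlib
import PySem

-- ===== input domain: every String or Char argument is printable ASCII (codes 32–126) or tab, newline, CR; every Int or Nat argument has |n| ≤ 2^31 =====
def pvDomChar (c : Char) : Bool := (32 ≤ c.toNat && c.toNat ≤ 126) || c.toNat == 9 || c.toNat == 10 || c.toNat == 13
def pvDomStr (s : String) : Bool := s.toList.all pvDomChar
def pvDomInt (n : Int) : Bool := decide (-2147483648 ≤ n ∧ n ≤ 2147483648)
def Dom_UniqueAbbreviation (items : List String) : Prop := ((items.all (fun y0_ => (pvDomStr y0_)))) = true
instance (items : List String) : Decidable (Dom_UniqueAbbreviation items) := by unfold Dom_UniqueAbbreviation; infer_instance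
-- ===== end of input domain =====

-- B replaces A's overwrite-then-delete dict construction (with a linear 'abbrev in items'
-- scan per repeated prefix) by sorting the items once and keeping a prefix iff it is longer
-- than the item's longest common prefix with a sorted neighbour; objective: faster (measured).

-- ===== PORT A =====
-- A's dict holds String or None values: ported as PySem.Dict String (Option String).
def UniqueAbbreviation (items : List String) : List (String × String) :=
  -- 'if items != None' is vacuous for a List String argument
  let unique : PySem.Dict String (Option String) :=
    items.foldl (fun u item =>
      (PySem.List.pyRange 0 (PySem.Str.len item) 1).foldl (fun u i =>
        let ab := PySem.Str.slice item (some 0) (some (i + 1))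
        if u.contains ab then
          if items.contains ab then u.insert ab (some ab)
          else u.insert ab none
        else u.insert ab (some item)) u)
      PySem.Dict.empty
  -- final loop: delete every key whose value is None (del keeps the order of the rest)
  unique.items.filterMap (fun p => p.2.map (fun v => (p.1, v)))

-- ===== PORT B =====
-- Source B's inner helper lcp (the zip loop; the early 'return n' stops the recursion)
def pvLcpGo (l : List (Char × Char)) (n : Int) : Int :=
  match l with
  | [] => n
  | (x, y) :: t => if x ≠ y then n else pvLcpGo t (n + 1)

def pvLcp (a b : String) : Int := pvLcpGo (a.toList.zip b.toList) 0

def UniqueAbbreviation_alt (items : List String) : List (String × String) :=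
  -- 'if items is None' is vacuous for a List String argument
  let lst := items
  let srt := PySem.List.sorted lst (fun x => x) false
  let thr : PySem.Dict String Int :=
    (PySem.List.enumerate srt 0).foldl (fun d ms =>
      let t : Int := 0
      let t := if 0 < ms.1 then max t (pvLcp ms.2 (PySem.List.pyGetD srt (ms.1 - 1) "")) else t
      let t := if ms.1 + 1 < (srt.length : Int) then
                 max t (pvLcp ms.2 (PySem.List.pyGetD srt (ms.1 + 1) "")) else t
      d.insert ms.2 (max (d.getD ms.2 0) t)) PySem.Dict.empty
  let names := PySem.Set.ofList lst
  ((lst.foldl (fun (sr : PySem.Set String × PySem.Dict String String) item =>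
      (PySem.List.pyRange 1 (PySem.Str.len item + 1) 1).foldl (fun sr j =>
        let p := PySem.Str.slice item none (some j)
        if sr.1.contains p then sr   -- 'continue'
        else
          let seen := sr.1.add p
          -- thr[item]: the key is always present (item occurs in srt), getD's default is unreachable
          if j > thr.getD item 0 then (seen, sr.2.insert p item)
          else if names.contains p then (seen, sr.2.insert p p)
          else (seen, sr.2)) sr)
    ((PySem.Set.empty : PySem.Set String), (PySem.Dict.empty : PySem.Dict String String))).2).items

-- ===== PRECONDITION & SPEC =====
def Spec_UniqueAbbreviation (items : List String) (out : List (String × String)) : Prop := out = UniqueAbbreviation_alt items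
instance (items : List String) (out : List (String × String)) : Decidable (Spec_UniqueAbbreviation items out) := by unfold Spec_UniqueAbbreviation; infer_instance

-- ===== CLAIM (what is proved, stated in full; the proofs are below) =====
def Claim_equal_UniqueAbbreviation : Prop := ∀ (items : List String), Dom_UniqueAbbreviation items → Spec_UniqueAbbreviation items (UniqueAbbreviation items)

-- ===== LEMMAS AND PROOFS =====

-- the prefix item[:j] as a String
def pvPref (x : String) (j : Nat) : String := String.ofList (x.toList.take j)

-- the common iteration sequence of both programs: every (prefix, item) event in order
def pvEvents (items : List String) : List (String × String) :=
  items.flatMap (fun x => (List.range x.toList.length).map (fun k => (pvPref x (k + 1), x)))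

def pvStepA (items : List String) (u : PySem.Dict String (Option String))
    (e : String × String) : PySem.Dict String (Option String) :=
  if u.contains e.1 then
    if items.contains e.1 then u.insert e.1 (some e.1) else u.insert e.1 none
  else u.insert e.1 (some e.2)

-- the neighbour-lcp threshold dict of port B, looked up at x
def pvThrD (items : List String) (x : String) : Int :=
  (let srt := PySem.List.sorted items (fun x => x) false
   (PySem.List.enumerate srt 0).foldl (fun d ms =>
      let t : Int := 0
      let t := if 0 < ms.1 then max t (pvLcp ms.2 (PySem.List.pyGetD srt (ms.1 - 1) "")) else t
      let t := if ms.1 + 1 < (srt.length : Int) then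
                 max t (pvLcp ms.2 (PySem.List.pyGetD srt (ms.1 + 1) "")) else t
      d.insert ms.2 (max (d.getD ms.2 0) t)) PySem.Dict.empty).getD x 0

def pvStepB (items : List String) (sr : PySem.Set String × PySem.Dict String String)
    (e : String × String) : PySem.Set String × PySem.Dict String String :=
  if sr.1.contains e.1 then sr
  else
    let seen := sr.1.add e.1
    if (e.1.toList.length : Int) > pvThrD items e.2 then (seen, sr.2.insert e.1 e.2)
    else if (PySem.Set.ofList items).contains e.1 then (seen, sr.2.insert e.1 e.1)
    else (seen, sr.2)

def pvCnt (l : List (String × String)) (p : String) : Nat := (l.map Prod.fst).count p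

def pvOwn (l : List (String × String)) (p : String) : Option String :=
  (List.find? (fun e => e.1 == p) l).map Prod.snd

-- A's final dict value at a prefix p
def pvAVal (items : List String) (l : List (String × String)) (p : String) : Option String :=
  if pvCnt l p = 1 then pvOwn l p
  else if items.contains p then some p else none

-- B's decision at the first encounter of p (owner x)
def pvBVal (items : List String) (p x : String) : Option String :=
  if (p.toList.length : Int) > pvThrD items x then some x
  else if (PySem.Set.ofList items).contains p then some p else none

-- nested loops over items×prefixes = one fold over pvEvents
theorem pvFoldEvents {σ : Type} (f : σ → String × String → σ) (items : List String) :
    ∀ (init : σ),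
      items.foldl (fun s x =>
        (List.range x.toList.length).foldl (fun s k => f s (pvPref x (k + 1), x)) s) init
      = (pvEvents items).foldl f init := by
  intro init
  induction items generalizing init with
  | nil => rfl
  | cons it rest ih =>
    simp only [pvEvents, List.flatMap_cons, List.foldl_append, List.foldl_cons,
      List.foldl_map] at *
    rw [ih]

theorem pvRange0_eq (item : String) :
    PySem.List.pyRange 0 (PySem.Str.len item) 1
      = (List.range item.toList.length).map (fun k : Nat => (k : Int)) := by
  rw [show PySem.Str.len item = ((item.toList.length : Nat) : Int) by simp]
  exact PySem.List.pyRange_zero_nat _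

theorem pvSliceA_eq (item : String) (k : Nat) :
    PySem.Str.slice item (some 0) (some ((k : Int) + 1)) = pvPref item (k + 1) := by
  rw [← String.toList_inj]
  simp only [PySem.Str.toList_slice, PySem.Chars.slice_eq_listSlice,
    PySem.List.slice_zero_start]
  rw [show ((k : Int) + 1) = ((k + 1 : Nat) : Int) by push_cast; ring,
    PySem.List.slice_to_natCast]
  simp [pvPref]

theorem pvSliceB_eq (item : String) (k : Nat) :
    PySem.Str.slice item none (some (1 + (k : Int))) = pvPref item (k + 1) := by
  rw [← String.toList_inj]
  simp only [PySem.Str.toList_slice, PySem.Chars.slice_eq_listSlice]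
  rw [show (1 + (k : Int)) = ((k + 1 : Nat) : Int) by push_cast; ring,
    PySem.List.slice_to_natCast]
  simp [pvPref]

theorem pvPortA_eq (items : List String) :
    UniqueAbbreviation items
      = ((pvEvents items).foldl (pvStepA items) PySem.Dict.empty).items.filterMap
          (fun p => p.2.map (fun v => (p.1, v))) := by
  rw [← pvFoldEvents (pvStepA items) items]
  show ((items.foldl _ PySem.Dict.empty).items.filterMap _) = _
  refine congrArg (fun z : PySem.Dict String (Option String) =>
    z.items.filterMap (fun p => p.2.map (fun v => (p.1, v)))) ?_
  refine PySem.List.foldl_congr_mem items _ _ _ ?_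
  intro u item _
  rw [pvRange0_eq item, List.foldl_map]
  refine PySem.List.foldl_congr_mem _ _ _ _ ?_
  intro acc k _
  show (let ab := PySem.Str.slice item (some 0) (some ((k : Int) + 1));
        if acc.contains ab then
          if items.contains ab then acc.insert ab (some ab)
          else acc.insert ab none
        else acc.insert ab (some item)) = _
  rw [pvSliceA_eq item k]
  rfl

theorem pvRange1_eq (item : String) :
    PySem.List.pyRange 1 (PySem.Str.len item + 1) 1
      = (List.range item.toList.length).map (fun k : Nat => 1 + (k : Int)) := by
  rw [PySem.List.pyRange_one]
  congr 1
  simp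

theorem pvPortB_eq (items : List String) :
    UniqueAbbreviation_alt items
      = ((pvEvents items).foldl (pvStepB items)
          ((PySem.Set.empty : PySem.Set String),
           (PySem.Dict.empty : PySem.Dict String String))).2.items := by
  rw [← pvFoldEvents (pvStepB items) items]
  show ((items.foldl _ ((PySem.Set.empty : PySem.Set String),
      (PySem.Dict.empty : PySem.Dict String String))).2).items
    = ((items.foldl _ ((PySem.Set.empty : PySem.Set String),
      (PySem.Dict.empty : PySem.Dict String String))).2).items
  refine congrArg (fun z : PySem.Set String × PySem.Dict String String => z.2.items) ?_
  refine PySem.List.foldl_congr_mem items _ _ _ ?_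
  intro sr item _
  rw [pvRange1_eq item, List.foldl_map]
  refine PySem.List.foldl_congr_mem _ _ _ _ ?_
  intro acc k hk
  have hk' : k < item.toList.length := List.mem_range.mp hk
  show (let p := PySem.Str.slice item none (some (1 + (k : Int)));
        if acc.1.contains p then acc
        else
          let seen := acc.1.add p
          if 1 + (k : Int) > pvThrD items item then (seen, acc.2.insert p item)
          else if (PySem.Set.ofList items).contains p then (seen, acc.2.insert p p)
          else (seen, acc.2)) = pvStepB items acc (pvPref item (k + 1), item)
  rw [pvSliceB_eq item k]
  have hlen : (((pvPref item (k + 1)).toList.length : Int)) = 1 + (k : Int) := by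
    have hk2 : k < item.length := by simpa [String.length_toList] using hk'
    simp [pvPref]
    omega
  simp only [pvStepB, hlen, gt_iff_lt]

-- dedup over an appended element
theorem pvDedup_append (xs : List String) (x : String) :
    PySem.List.dedup (xs ++ [x])
      = if x ∈ xs then PySem.List.dedup xs else PySem.List.dedup xs ++ [x] := by
  simp only [PySem.List.dedup_eq_ofList]
  simp [pysem, PySem.Set.add]

theorem pvMem_dedup (xs : List String) (x : String) :
    x ∈ PySem.List.dedup xs ↔ x ∈ xs := by
  simp [PySem.List.dedup_eq_ofList, PySem.Set.mem_ofList]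

-- count / owner over an appended event
theorem pvCnt_append (l : List (String × String)) (e : String × String) (p : String) :
    pvCnt (l ++ [e]) p = pvCnt l p + (if e.1 = p then 1 else 0) := by
  simp [pvCnt, List.count_append, List.count_singleton, beq_iff_eq]

theorem pvOwn_append_of_ne (l : List (String × String)) (e : String × String) (p : String)
    (h : e.1 ≠ p) : pvOwn (l ++ [e]) p = pvOwn l p := by
  simp only [pvOwn, List.find?_append, List.find?]
  rw [show (e.1 == p) = false by simpa using h]
  simp

theorem pvOwn_append_of_not_mem (l : List (String × String)) (e : String × String)
    (h : e.1 ∉ l.map Prod.fst) : pvOwn (l ++ [e]) e.1 = some e.2 := by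
  have hn : List.find? (fun q => q.1 == e.1) l = none := by
    apply List.find?_eq_none.mpr
    intro q hq
    simp only [beq_iff_eq]
    exact fun hh => h (hh ▸ List.mem_map_of_mem hq)
  simp [pvOwn, List.find?_append, hn, List.find?]

theorem pvOwn_isSome (l : List (String × String)) (p : String)
    (h : p ∈ l.map Prod.fst) : (List.find? (fun e => e.1 == p) l).isSome := by
  apply List.find?_isSome.mpr
  obtain ⟨q, hq, hqp⟩ := List.mem_map.mp h
  exact ⟨q, hq, by simp [hqp]⟩

theorem pvOwn_append_of_mem (l : List (String × String)) (e : String × String) (p : String)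
    (h : p ∈ l.map Prod.fst) : pvOwn (l ++ [e]) p = pvOwn l p := by
  obtain ⟨a, ha⟩ := Option.isSome_iff_exists.mp (pvOwn_isSome l p h)
  simp [pvOwn, List.find?_append, ha]

-- cnt = 0 exactly off the prefix list
theorem pvCnt_eq_zero (l : List (String × String)) (p : String) (h : p ∉ l.map Prod.fst) :
    pvCnt l p = 0 := by
  simp [pvCnt, List.count_eq_zero, h]

theorem pvCnt_pos (l : List (String × String)) (p : String) (h : p ∈ l.map Prod.fst) :
    1 ≤ pvCnt l p := by
  simpa [pvCnt] using List.count_pos_iff.mpr h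

-- ===== A-side invariant =====
theorem pvOfList_append (xs : List String) (x : String) :
    PySem.Set.ofList (xs ++ [x]) = (PySem.Set.ofList xs).add x := by
  simp [pysem]

theorem pvAVal_append_of_ne (items : List String) (l : List (String × String))
    (e : String × String) (p : String) (h : e.1 ≠ p) :
    pvAVal items (l ++ [e]) p = pvAVal items l p := by
  unfold pvAVal
  rw [pvCnt_append, pvOwn_append_of_ne l e p h]
  simp [h]

theorem pvAInv (items : List String) : ∀ (l : List (String × String)),
    (l.foldl (pvStepA items) PySem.Dict.empty).items
      = (PySem.List.dedup (l.map Prod.fst)).map (fun p => (p, pvAVal items l p)) := by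
  intro l
  induction l using List.reverseRecOn with
  | nil => rfl
  | append_singleton l e ih =>
    have hkeys : ∀ (p : String),
        ((l.foldl (pvStepA items) PySem.Dict.empty).contains p = true) ↔ p ∈ l.map Prod.fst := by
      intro p
      rw [PySem.Dict.contains_eq_decide_mem_keys]
      simp only [PySem.Dict.keys, ih, List.map_map]
      have hid : (Prod.fst ∘ fun p : String => (p, pvAVal items l p)) = id := rfl
      rw [hid, List.map_id]
      simp
    rw [List.foldl_append, List.foldl_cons, List.foldl_nil]
    by_cases hmem : e.1 ∈ l.map Prod.fst
    · have hcont : (l.foldl (pvStepA items) PySem.Dict.empty).contains e.1 = true :=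
        (hkeys e.1).mpr hmem
      have hstep : pvStepA items (l.foldl (pvStepA items) PySem.Dict.empty) e
          = (l.foldl (pvStepA items) PySem.Dict.empty).insert e.1
              (if items.contains e.1 then some e.1 else none) := by
        simp only [pvStepA, hcont, if_true]
        split_ifs <;> rfl
      rw [hstep, PySem.Dict.items_insert_of_contains _ _ hcont, ih, List.map_map]
      simp only [List.map_append, List.map_cons, List.map_nil]
      rw [pvDedup_append, if_pos hmem]
      refine List.map_congr_left ?_
      intro p hp
      by_cases hpe : p = e.1
      · subst hpe
        have hval : pvAVal items (l ++ [e]) e.1 = if items.contains e.1 then some e.1 else none := by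
          have hc1 : 1 ≤ pvCnt l e.1 := pvCnt_pos l e.1 hmem
          unfold pvAVal
          rw [pvCnt_append, if_pos rfl, if_neg (by omega)]
        simp only [Function.comp_apply, beq_self_eq_true, if_true, hval]
      · have hne : (p == e.1) = false := by simpa using hpe
        simp only [Function.comp_apply, hne, Bool.false_eq_true, if_false]
        rw [pvAVal_append_of_ne items l e p (fun hh => hpe hh.symm)]
    · have hcont : (l.foldl (pvStepA items) PySem.Dict.empty).contains e.1 = false := by
        rw [← Bool.not_eq_true, hkeys]
        exact hmem
      have hstep : pvStepA items (l.foldl (pvStepA items) PySem.Dict.empty) e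
          = (l.foldl (pvStepA items) PySem.Dict.empty).insert e.1 (some e.2) := by
        simp [pvStepA, hcont]
      rw [hstep, PySem.Dict.items_insert_of_not_contains _ _ hcont, ih]
      simp only [List.map_append, List.map_cons, List.map_nil]
      rw [pvDedup_append, if_neg hmem, List.map_append]
      congr 1
      · refine List.map_congr_left ?_
        intro p hp
        have hpe : e.1 ≠ p := fun h => hmem (h ▸ (pvMem_dedup _ _).mp hp)
        rw [pvAVal_append_of_ne items l e p hpe]
      · have hval : pvAVal items (l ++ [e]) e.1 = some e.2 := by
          unfold pvAVal
          rw [pvCnt_append, if_pos rfl, pvCnt_eq_zero l e.1 hmem,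
            pvOwn_append_of_not_mem l e hmem]
          simp
        simp [hval]

-- ===== B-side invariant =====
theorem pvBInv (items : List String) : ∀ (l : List (String × String)),
    (l.foldl (pvStepB items) ((PySem.Set.empty : PySem.Set String),
        (PySem.Dict.empty : PySem.Dict String String))).1
      = PySem.Set.ofList (l.map Prod.fst)
    ∧ (l.foldl (pvStepB items) ((PySem.Set.empty : PySem.Set String),
        (PySem.Dict.empty : PySem.Dict String String))).2.items
      = (PySem.List.dedup (l.map Prod.fst)).filterMap
          (fun p => (pvBVal items p ((pvOwn l p).getD "")).map (fun v => (p, v))) := by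
  intro l
  induction l using List.reverseRecOn with
  | nil => exact ⟨rfl, rfl⟩
  | append_singleton l e ih =>
    obtain ⟨ih1, ih2⟩ := ih
    rw [List.foldl_append, List.foldl_cons, List.foldl_nil]
    set st := l.foldl (pvStepB items) ((PySem.Set.empty : PySem.Set String),
        (PySem.Dict.empty : PySem.Dict String String)) with hst
    simp only [List.map_append, List.map_cons, List.map_nil]
    have hseen : st.1.contains e.1 = true ↔ e.1 ∈ l.map Prod.fst := by
      rw [ih1, PySem.Set.contains_eq_listContains]
      simp [PySem.Set.mem_ofList]
    by_cases hmem : e.1 ∈ l.map Prod.fst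
    · have hc : st.1.contains e.1 = true := hseen.mpr hmem
      have hstep : pvStepB items st e = st := by
        simp only [pvStepB, hc, if_true]
      rw [hstep, pvDedup_append, if_pos hmem]
      constructor
      · rw [ih1, pvOfList_append]
        have hm : e.1 ∈ PySem.Set.ofList (l.map Prod.fst) := (PySem.Set.mem_ofList _ _).mpr hmem
        simp [PySem.Set.add, PySem.Set.contains_eq_listContains, hm]
      · rw [ih2]
        refine (List.filterMap_congr ?_).symm
        intro p hp
        rw [pvOwn_append_of_mem l e p ((pvMem_dedup _ _).mp hp)]
    · have hc : st.1.contains e.1 = false := by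
        rw [← Bool.not_eq_true, hseen]
        exact hmem
      have hdc : st.2.contains e.1 = false := by
        rw [PySem.Dict.contains_eq_decide_mem_keys]
        simp only [PySem.Dict.keys, ih2, decide_eq_false_iff_not]
        intro hmem2
        obtain ⟨q, hq, hq1⟩ := List.mem_map.mp hmem2
        obtain ⟨p, hp, hpq⟩ := List.mem_filterMap.mp hq
        obtain ⟨v, _, hv⟩ := Option.map_eq_some_iff.mp hpq
        have hpe : p = e.1 := by rw [← hq1, ← hv]
        exact hmem (hpe ▸ (pvMem_dedup _ _).mp hp)
      have howne : pvOwn (l ++ [e]) e.1 = some e.2 := pvOwn_append_of_not_mem l e hmem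
      have hcongr : (PySem.List.dedup (l.map Prod.fst)).filterMap
            (fun p => (pvBVal items p ((pvOwn (l ++ [e]) p).getD "")).map (fun v => (p, v)))
          = st.2.items := by
        rw [ih2]
        refine (List.filterMap_congr ?_).symm
        intro p hp
        rw [pvOwn_append_of_mem l e p ((pvMem_dedup _ _).mp hp)]
      rw [pvDedup_append, if_neg hmem, List.filterMap_append, hcongr]
      constructor
      · have h1 : (pvStepB items st e).1 = st.1.add e.1 := by
          simp only [pvStepB, hc, Bool.false_eq_true, if_false]
          split_ifs <;> rfl
        rw [h1, ih1, pvOfList_append]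
      · by_cases h1 : ((e.1.toList.length : Int)) > pvThrD items e.2
        · have hval : pvBVal items e.1 ((pvOwn (l ++ [e]) e.1).getD "") = some e.2 := by
            rw [howne]
            simp only [Option.getD_some, pvBVal]
            rw [if_pos h1]
          have hstep2 : (pvStepB items st e).2 = st.2.insert e.1 e.2 := by
            simp only [pvStepB, hc, Bool.false_eq_true, if_false]
            rw [if_pos h1]
          rw [hstep2, PySem.Dict.items_insert_of_not_contains _ _ hdc]
          congr 1
          simp [hval]
        · by_cases h2 : (PySem.Set.ofList items).contains e.1 = true
          · have hval : pvBVal items e.1 ((pvOwn (l ++ [e]) e.1).getD "") = some e.1 := by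
              rw [howne]
              simp only [Option.getD_some, pvBVal]
              rw [if_neg h1, if_pos h2]
            have hstep2 : (pvStepB items st e).2 = st.2.insert e.1 e.1 := by
              simp only [pvStepB, hc, Bool.false_eq_true, if_false]
              rw [if_neg h1, if_pos h2]
            rw [hstep2, PySem.Dict.items_insert_of_not_contains _ _ hdc]
            congr 1
            simp [hval]
          · have hval : pvBVal items e.1 ((pvOwn (l ++ [e]) e.1).getD "") = none := by
              rw [howne]
              simp only [Option.getD_some, pvBVal]
              rw [if_neg h1, if_neg h2]
            have hstep2 : (pvStepB items st e).2 = st.2 := by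
              simp only [pvStepB, hc, Bool.false_eq_true, if_false]
              rw [if_neg h1, if_neg h2]
            rw [hstep2]
            have hnil : List.filterMap (fun p => (pvBVal items p ((pvOwn (l ++ [e]) p).getD "")).map
                (fun v => (p, v))) [e.1] = [] := by
              simp [hval]
            rw [hnil, List.append_nil]

-- ===== lcp characterisation =====
def pvLcpN : List Char → List Char → Nat
  | x :: a, y :: b => if x = y then pvLcpN a b + 1 else 0
  | _, _ => 0

theorem pvLcpGo_eq : ∀ (a b : List Char) (n : Int),
    pvLcpGo (a.zip b) n = n + (pvLcpN a b : Int) := by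
  intro a
  induction a with
  | nil => intro b n; simp [pvLcpGo, pvLcpN]
  | cons x a ih =>
    intro b n
    cases b with
    | nil => simp [pvLcpGo, pvLcpN]
    | cons y b =>
      by_cases hxy : x = y
      · subst hxy
        simp only [List.zip_cons_cons, pvLcpGo, ne_eq, not_true_eq_false, if_false]
        rw [ih b (n + 1)]
        simp only [pvLcpN]
        push_cast
        ring
      · simp [pvLcpGo, pvLcpN, hxy]

theorem pvLcp_eq (a b : String) : pvLcp a b = (pvLcpN a.toList b.toList : Int) := by
  simpa using pvLcpGo_eq a.toList b.toList 0

theorem pvLcpN_le_iff (a : List Char) : ∀ (b : List Char) (j : Nat),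
    j ≤ pvLcpN a b ↔ j ≤ a.length ∧ j ≤ b.length ∧ a.take j = b.take j := by
  induction a with
  | nil =>
    intro b j
    simp only [pvLcpN, List.length_nil, Nat.le_zero]
    constructor
    · rintro rfl; simp
    · rintro ⟨rfl, _⟩; rfl
  | cons x a ih =>
    intro b j
    cases b with
    | nil =>
      simp only [pvLcpN, List.length_nil, Nat.le_zero]
      constructor
      · rintro rfl; simp
      · rintro ⟨_, rfl, _⟩; rfl
    | cons y b =>
      by_cases hxy : x = y
      · subst hxy
        cases j with
        | zero => simp [pvLcpN]
        | succ j =>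
          simpa [pvLcpN, Nat.succ_le_succ_iff] using ih b j
      · cases j with
        | zero => simp
        | succ j =>
          simp only [pvLcpN, if_neg hxy, List.length_cons, Nat.succ_le_succ_iff,
            List.take_succ_cons, List.cons.injEq]
          constructor
          · omega
          · rintro ⟨_, _, h, _⟩; exact absurd h hxy

-- ===== lexicographic order: a common prefix of the endpoints covers everything between =====
theorem pvBetween_chars : ∀ (p a z c : List Char),
    p <+: a → p <+: c → ¬ List.Lex (· < ·) z a → ¬ List.Lex (· < ·) c z → p <+: z := by
  intro p
  induction p with
  | nil => intro a z c _ _ _ _; exact List.nil_prefix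
  | cons x p ih =>
    intro a z c pa pc h1 h2
    obtain ⟨ta, rfl⟩ := pa
    obtain ⟨tc, rfl⟩ := pc
    cases z with
    | nil => exact absurd List.Lex.nil h1
    | cons y z =>
      rcases lt_trichotomy y x with hyx | hyx | hyx
      · exact absurd (by rw [List.cons_append]; exact List.Lex.rel hyx) h1
      · subst hyx
        have h1' : ¬ List.Lex (· < ·) z (p ++ ta) := by
          intro hh
          exact h1 (by rw [List.cons_append]; exact List.Lex.cons hh)
        have h2' : ¬ List.Lex (· < ·) (p ++ tc) z := by
          intro hh
          exact h2 (by rw [List.cons_append]; exact List.Lex.cons hh)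
        have := ih (p ++ ta) z (p ++ tc) (List.prefix_append p ta) (List.prefix_append p tc)
          h1' h2'
        exact List.cons_prefix_cons.mpr ⟨rfl, this⟩
      · exact absurd (by rw [List.cons_append]; exact List.Lex.rel hyx) h2

theorem pvPrefix_between (p : List Char) (a z c : String)
    (pa : p <+: a.toList) (pc : p <+: c.toList) (h1 : a ≤ z) (h2 : z ≤ c) :
    p <+: z.toList := by
  refine pvBetween_chars p a.toList z.toList c.toList pa pc ?_ ?_
  · intro hh
    exact absurd (String.lt_iff_toList_lt.mpr hh) (not_lt.mpr h1)
  · intro hh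
    exact absurd (String.lt_iff_toList_lt.mpr hh) (not_lt.mpr h2)

-- ===== running max-per-key dict fold =====
theorem pvGetD_maxfold (g : Int → String → Int) :
    ∀ (l : List (Int × String)) (d : PySem.Dict String Int) (k : String),
      (l.foldl (fun d ms => d.insert ms.2 (max (d.getD ms.2 0) (g ms.1 ms.2))) d).getD k 0
        = (l.filter (fun ms => ms.2 == k)).foldl (fun a ms => max a (g ms.1 ms.2)) (d.getD k 0) := by
  intro l
  induction l with
  | nil => intro d k; simp
  | cons ms l ih =>
    intro d k
    simp only [List.foldl_cons, List.filter_cons]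
    by_cases hms : ms.2 = k
    · rw [if_pos (by simpa using hms), List.foldl_cons, ih]
      rw [PySem.Dict.getD_insert]
      rw [if_pos hms.symm, hms]
    · rw [if_neg (by simpa using hms), ih]
      rw [PySem.Dict.getD_insert, if_neg (fun hh => hms hh.symm)]

theorem pvLe_maxfold_iff {α : Type} (g : α → Int) (l : List α) :
    ∀ (init j : Int),
    (j ≤ l.foldl (fun a e => max a (g e)) init ↔ j ≤ init ∨ ∃ e ∈ l, j ≤ g e) := by
  induction l with
  | nil => intro init j; simp
  | cons e l ih =>
    intro init j
    simp only [List.foldl_cons, ih, le_max_iff, List.mem_cons]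
    constructor
    · rintro ((h | h) | ⟨e', he', hj⟩)
      · exact Or.inl h
      · exact Or.inr ⟨e, Or.inl rfl, h⟩
      · exact Or.inr ⟨e', Or.inr he', hj⟩
    · rintro (h | ⟨e', (rfl | he'), hj⟩)
      · exact Or.inl (Or.inl h)
      · exact Or.inl (Or.inr hj)
      · exact Or.inr ⟨e', he', hj⟩

-- two distinct positions from a double count
theorem pvTwo_pos (l : List String) (x : String) (h : 2 ≤ l.count x) :
    ∃ i k, ∃ (hi : i < l.length) (hk : k < l.length), i ≠ k ∧ l[i] = x ∧ l[k] = x := by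
  induction l with
  | nil => simp at h
  | cons a t ih =>
    by_cases hax : a = x
    · have h1 : 1 ≤ t.count x := by
        subst hax
        rw [List.count_cons_self] at h
        omega
      obtain ⟨jj, hj, hx⟩ := List.mem_iff_getElem.mp (List.count_pos_iff.mp h1)
      exact ⟨0, jj + 1, by simp, by simpa using Nat.succ_lt_succ hj,
        by omega, by simpa using hax, by simpa using hx⟩
    · have h2 : 2 ≤ t.count x := by
        have hcc := h
        simp [hax] at hcc
        omega
      obtain ⟨i, k, hi, hk, hik, hxi, hxk⟩ := ih h2
      exact ⟨i + 1, k + 1, by simpa using Nat.succ_lt_succ hi,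
        by simpa using Nat.succ_lt_succ hk, by omega, by simpa using hxi, by simpa using hxk⟩

theorem pvCount_two_of_two_pos_lt (l : List String) (x : String) (i k : Nat)
    (hi : i < l.length) (hk : k < l.length) (hik : i < k) (hxi : l[i] = x) (hxk : l[k] = x) :
    2 ≤ l.count x := by
  have h1 : x ∈ l.take (i + 1) := by
    have hlen : i < (l.take (i + 1)).length := by
      simp only [List.length_take]
      omega
    have : (l.take (i + 1))[i]'hlen = l[i] := by
      simp
    rw [← hxi, ← this]
    exact List.getElem_mem _
  have h2 : x ∈ l.drop (i + 1) := by
    have hlen : k - (i + 1) < (l.drop (i + 1)).length := by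
      simp only [List.length_drop]
      omega
    have : (l.drop (i + 1))[k - (i + 1)]'hlen = l[k] := by
      rw [List.getElem_drop]
      congr 1
      omega
    rw [← hxk, ← this]
    exact List.getElem_mem _
  have hsum : l.count x = (l.take (i + 1)).count x + (l.drop (i + 1)).count x := by
    conv_lhs => rw [← List.take_append_drop (i + 1) l]
    rw [List.count_append]
  have c1 := List.count_pos_iff.mpr h1
  have c2 := List.count_pos_iff.mpr h2
  omega

theorem pvCount_two_of_two_pos (l : List String) (x : String) (i k : Nat)
    (hi : i < l.length) (hk : k < l.length) (hik : i ≠ k) (hxi : l[i] = x) (hxk : l[k] = x) :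
    2 ≤ l.count x := by
  rcases Nat.lt_or_ge i k with h | h
  · exact pvCount_two_of_two_pos_lt l x i k hi hk h hxi hxk
  · exact pvCount_two_of_two_pos_lt l x k i hk hi (by omega) hxk hxi

-- ===== the threshold dict says exactly 'some other element shares this prefix' =====
-- the per-position neighbour value of the thr fold
def pvTval (items : List String) (m : Int) (s : String) : Int :=
  let srt := PySem.List.sorted items (fun x => x) false
  let t : Int := 0
  let t := if 0 < m then max t (pvLcp s (PySem.List.pyGetD srt (m - 1) "")) else t
  if m + 1 < (srt.length : Int) then max t (pvLcp s (PySem.List.pyGetD srt (m + 1) "")) else t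

theorem pvThrD_eq (items : List String) (x : String) :
    pvThrD items x
      = ((PySem.List.enumerate (PySem.List.sorted items (fun x => x) false) 0).filter
          (fun ms => ms.2 == x)).foldl
          (fun a ms => max a (pvTval items ms.1 ms.2)) 0 := by
  have h := pvGetD_maxfold (pvTval items)
    (PySem.List.enumerate (PySem.List.sorted items (fun x => x) false) 0) PySem.Dict.empty x
  rw [PySem.Dict.getD_empty] at h
  exact h

theorem pvLe_thrD_iff (items : List String) (x : String) (j : Int) (hj : 1 ≤ j) :
    j ≤ pvThrD items x
      ↔ ∃ ms ∈ PySem.List.enumerate (PySem.List.sorted items (fun x => x) false) 0,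
          ms.2 = x ∧ j ≤ pvTval items ms.1 ms.2 := by
  rw [pvThrD_eq, pvLe_maxfold_iff]
  constructor
  · rintro (h | ⟨ms, hms, hle⟩)
    · omega
    · rw [List.mem_filter] at hms
      exact ⟨ms, hms.1, by simpa using hms.2, hle⟩
  · rintro ⟨ms, hms, hxx, hle⟩
    exact Or.inr ⟨ms, List.mem_filter.mpr ⟨hms, by simpa using hxx⟩, hle⟩

theorem pvLe_tval_iff (items : List String) (k : Nat)
    (hk : k < (PySem.List.sorted items (fun x => x) false).length) (j : Int) (hj : 1 ≤ j) :
    j ≤ pvTval items (k : Int) ((PySem.List.sorted items (fun x => x) false)[k])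
      ↔ (0 < k ∧ j ≤ pvLcp ((PySem.List.sorted items (fun x => x) false)[k])
            ((PySem.List.sorted items (fun x => x) false)[k - 1]'(by omega)))
        ∨ (∃ (h1 : k + 1 < (PySem.List.sorted items (fun x => x) false).length),
            j ≤ pvLcp ((PySem.List.sorted items (fun x => x) false)[k])
                ((PySem.List.sorted items (fun x => x) false)[k + 1]'h1)) := by
  set srt := PySem.List.sorted items (fun x => x) false with hsrt
  by_cases h0 : 0 < k
  · have hg1 : PySem.List.pyGetD srt ((k : Int) - 1) "" = srt[k - 1]'(by omega) := by
      rw [show ((k : Int) - 1) = ((k - 1 : Nat) : Int) by omega,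
        PySem.List.pyGetD_eq_getElem srt "" (by positivity) (by exact_mod_cast (by omega : k - 1 < srt.length))]
      simp
    by_cases h1 : k + 1 < srt.length
    · have hg2 : PySem.List.pyGetD srt ((k : Int) + 1) "" = srt[k + 1]'h1 := by
        rw [show ((k : Int) + 1) = ((k + 1 : Nat) : Int) by omega,
          PySem.List.pyGetD_eq_getElem srt "" (by positivity) (by exact_mod_cast h1)]
        simp
      simp only [pvTval, ← hsrt, if_pos (by exact_mod_cast h0 : (0:Int) < (k : Int)),
        if_pos (by exact_mod_cast h1 : ((k : Int) + 1) < (srt.length : Int)), hg1, hg2,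
        le_max_iff]
      constructor
      · rintro ((hh | hh) | hh)
        · omega
        · exact Or.inl ⟨h0, hh⟩
        · exact Or.inr ⟨h1, hh⟩
      · rintro (⟨_, hh⟩ | ⟨_, hh⟩)
        · exact Or.inl (Or.inr hh)
        · exact Or.inr hh
    · simp only [pvTval, ← hsrt, if_pos (by exact_mod_cast h0 : (0:Int) < (k : Int)),
        if_neg (by exact_mod_cast h1 : ¬ ((k : Int) + 1) < (srt.length : Int)), hg1,
        le_max_iff]
      constructor
      · rintro (hh | hh)
        · exact absurd hh (by omega)
        · exact Or.inl ⟨h0, hh⟩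
      · rintro (⟨_, hh⟩ | ⟨hh, _⟩)
        · exact Or.inr hh
        · exact absurd hh h1
  · by_cases h1 : k + 1 < srt.length
    · have hg2 : PySem.List.pyGetD srt ((k : Int) + 1) "" = srt[k + 1]'h1 := by
        rw [show ((k : Int) + 1) = ((k + 1 : Nat) : Int) by omega,
          PySem.List.pyGetD_eq_getElem srt "" (by positivity) (by exact_mod_cast h1)]
        simp
      simp only [pvTval, ← hsrt, if_neg (by exact_mod_cast h0 : ¬ (0:Int) < (k : Int)),
        if_pos (by exact_mod_cast h1 : ((k : Int) + 1) < (srt.length : Int)), hg2, le_max_iff]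
      constructor
      · rintro (hh | hh)
        · exact absurd hh (by omega)
        · exact Or.inr ⟨h1, hh⟩
      · rintro (⟨hh, _⟩ | ⟨_, hh⟩)
        · exact absurd hh h0
        · exact Or.inr hh
    · simp only [pvTval, ← hsrt, if_neg (by exact_mod_cast h0 : ¬ (0:Int) < (k : Int)),
        if_neg (by exact_mod_cast h1 : ¬ ((k : Int) + 1) < (srt.length : Int))]
      constructor
      · intro hh
        exact absurd hh (by omega)
      · rintro (⟨hh, _⟩ | ⟨hh, _⟩)
        · exact absurd hh h0
        · exact absurd hh h1

-- a second sorted position (other than k, which holds x) is in items.erase x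
theorem pvOther_mem_erase (items : List String) (x : String) (i k : Nat)
    (hi : i < (PySem.List.sorted items (fun x => x) false).length)
    (hk : k < (PySem.List.sorted items (fun x => x) false).length)
    (hik : i ≠ k) (hxk : (PySem.List.sorted items (fun x => x) false)[k] = x) :
    (PySem.List.sorted items (fun x => x) false)[i] ∈ items.erase x := by
  set srt := PySem.List.sorted items (fun x => x) false with hsrt
  have hperm : srt.Perm items := PySem.List.sorted_perm items _ false
  by_cases hyx : srt[i] = x
  · have h2 : 2 ≤ srt.count x := pvCount_two_of_two_pos srt x i k hi hk hik hyx hxk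
    have h2' : 2 ≤ items.count x := by rwa [hperm.count_eq] at h2
    have := List.count_erase_self (a := x) (l := items)
    rw [hyx]
    exact List.count_pos_iff.mp (by omega)
  · exact (List.mem_erase_of_ne hyx).mpr (hperm.mem_iff.mp (List.getElem_mem _))

-- two distinct sorted positions for x and a co-element y
theorem pvPositions (items : List String) (x y : String) (hx : x ∈ items)
    (hy : y ∈ items.erase x) :
    ∃ i k, ∃ (hi : i < (PySem.List.sorted items (fun x => x) false).length)
      (hk : k < (PySem.List.sorted items (fun x => x) false).length), i ≠ k
      ∧ (PySem.List.sorted items (fun x => x) false)[i] = y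
      ∧ (PySem.List.sorted items (fun x => x) false)[k] = x := by
  set srt := PySem.List.sorted items (fun x => x) false with hsrt
  have hperm : srt.Perm items := PySem.List.sorted_perm items _ false
  by_cases hyx : y = x
  · subst hyx
    have hc : 2 ≤ items.count y := by
      have h1 := List.count_pos_iff.mpr hy
      have := List.count_erase_self (a := y) (l := items)
      omega
    have hc' : 2 ≤ srt.count y := by rwa [hperm.count_eq]
    obtain ⟨i, k, hi, hk, hik, h1, h2⟩ := pvTwo_pos srt y hc'
    exact ⟨i, k, hi, hk, hik, h1, h2⟩
  · obtain ⟨i, hi, hiy⟩ := List.mem_iff_getElem.mp (hperm.mem_iff.mpr (List.mem_of_mem_erase hy))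
    obtain ⟨k, hk, hkx⟩ := List.mem_iff_getElem.mp (hperm.mem_iff.mpr hx)
    refine ⟨i, k, hi, hk, ?_, hiy, hkx⟩
    intro hh
    subst hh
    exact hyx (by rw [← hiy]; exact hkx)

theorem pvThrD_iff (items : List String) (x : String) (hx : x ∈ items) (j : Nat)
    (hj : 1 ≤ j) (hjx : j ≤ x.toList.length) :
    ((j : Int) ≤ pvThrD items x ↔ ∃ y ∈ items.erase x, x.toList.take j <+: y.toList) := by
  set srt := PySem.List.sorted items (fun x => x) false with hsrt
  have hsl : (PySem.List.sorted items (fun x => x) false).length = srt.length := rfl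
  have hperm : srt.Perm items := PySem.List.sorted_perm items _ false
  have hjlen : (x.toList.take j).length = j := by
    rw [List.length_take]
    omega
  constructor
  · intro h
    obtain ⟨ms, hms, hmsx, hle⟩ := (pvLe_thrD_iff items x (j : Int) (by exact_mod_cast hj)).mp h
    obtain ⟨k, hk, rfl⟩ := (PySem.List.mem_enumerate_iff srt 0 ms).mp hms
    simp only [zero_add] at hmsx hle
    rw [hmsx] at hle
    rw [show ((k : Int)) = ((k : Nat) : Int) from rfl] at hle
    rw [← hmsx] at hle
    have hle' := (pvLe_tval_iff items k hk (j : Int) (by exact_mod_cast hj)).mp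
      (by rw [hmsx] at hle ⊢; exact hle)
    have hout : ∀ (i : Nat) (hi : i < srt.length), i ≠ k →
        (j : Int) ≤ pvLcp x (srt[i]) → ∃ y ∈ items.erase x, x.toList.take j <+: y.toList := by
      intro i hi hik hlcp
      refine ⟨srt[i], pvOther_mem_erase items x i k hi hk hik hmsx, ?_⟩
      rw [pvLcp_eq] at hlcp
      have hlcp' : j ≤ pvLcpN x.toList (srt[i]).toList := by exact_mod_cast hlcp
      obtain ⟨_, hylen, htake⟩ := (pvLcpN_le_iff x.toList (srt[i]).toList j).mp hlcp'
      rw [htake]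
      exact List.take_prefix _ _
    rcases hle' with ⟨h0, hlcp⟩ | ⟨h1, hlcp⟩
    · exact hout (k - 1) (by omega) (by omega) (by rw [← hmsx]; exact hlcp)
    · exact hout (k + 1) h1 (by omega) (by rw [← hmsx]; exact hlcp)
  · rintro ⟨y, hy, hpre⟩
    obtain ⟨i, k, hi, hk, hik, hiy, hkx⟩ := pvPositions items x y hx hy
    have hylen : j ≤ y.toList.length := by
      have := hpre.length_le
      omega
    have hkey : ∀ (m : Nat) (hm : m < srt.length), m ≠ k →
        x.toList.take j <+: (srt[m]).toList → (j : Int) ≤ pvLcp x srt[m] := by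
      intro m hm hmk hpm
      rw [pvLcp_eq]
      have h1 : j ≤ pvLcpN x.toList (srt[m]).toList := by
        refine (pvLcpN_le_iff x.toList (srt[m]).toList j).mpr ⟨hjx, ?_, ?_⟩
        · have := hpm.length_le
          omega
        · have h2 := List.prefix_iff_eq_take.mp hpm
          rw [hjlen] at h2
          exact h2
      exact_mod_cast h1
    rcases Nat.lt_or_ge i k with hlt | hge
    · have hk1 : k - 1 < srt.length := by omega
      have hz : x.toList.take j <+: (srt[k - 1]'hk1).toList := by
        refine pvPrefix_between (x.toList.take j) y (srt[k - 1]'hk1) x ?_ ?_ ?_ ?_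
        · exact hpre
        · exact List.take_prefix _ _
        · rw [← hiy]
          exact PySem.List.sorted_id_getElem_mono items (by omega) hk1
        · rw [← hkx]
          exact PySem.List.sorted_id_getElem_mono items (by omega) hk
      refine (pvLe_thrD_iff items x (j : Int) (by exact_mod_cast hj)).mpr
        ⟨((k : Int), srt[k]), ?_, hkx, ?_⟩
      · exact (PySem.List.mem_enumerate_iff srt 0 _).mpr ⟨k, hk, by simp⟩
      · refine (pvLe_tval_iff items k hk (j : Int) (by exact_mod_cast hj)).mpr ?_
        exact Or.inl ⟨by omega, by rw [hkx]; exact hkey (k - 1) hk1 (by omega) hz⟩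
    · have hklt : k < i := by omega
      have hk1 : k + 1 < srt.length := by omega
      have hz : x.toList.take j <+: (srt[k + 1]'hk1).toList := by
        refine pvPrefix_between (x.toList.take j) x (srt[k + 1]'hk1) y ?_ ?_ ?_ ?_
        · exact List.take_prefix _ _
        · exact hpre
        · rw [← hkx]
          exact PySem.List.sorted_id_getElem_mono items (by omega) hk1
        · rw [← hiy]
          exact PySem.List.sorted_id_getElem_mono items (by omega) hi
      refine (pvLe_thrD_iff items x (j : Int) (by exact_mod_cast hj)).mpr
        ⟨((k : Int), srt[k]), ?_, hkx, ?_⟩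
      · exact (PySem.List.mem_enumerate_iff srt 0 _).mpr ⟨k, hk, by simp⟩
      · refine (pvLe_tval_iff items k hk (j : Int) (by exact_mod_cast hj)).mpr ?_
        exact Or.inr ⟨hk1, by rw [hkx]; exact hkey (k + 1) hk1 (by omega) hz⟩

theorem pvPref_toList (x : String) (j : Nat) : (pvPref x j).toList = x.toList.take j := by
  simp [pvPref]

theorem pvPref_eq_iff (x p : String) (k : Nat) (hk : k < x.toList.length) :
    pvPref x (k + 1) = p ↔ (k + 1 = p.toList.length ∧ p.toList <+: x.toList) := by
  constructor
  · intro hh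
    have ht : x.toList.take (k + 1) = p.toList := by rw [← hh, pvPref_toList]
    constructor
    · rw [← ht, List.length_take]
      omega
    · rw [← ht]
      exact List.take_prefix _ _
  · rintro ⟨hlen, hpre⟩
    rw [← String.toList_inj, pvPref_toList, hlen]
    exact (List.prefix_iff_eq_take.mp hpre).symm

theorem pvCnt_block (x p : String) (hp : 1 ≤ p.toList.length) : ∀ (n : Nat),
    n ≤ x.toList.length →
    ((List.range n).map (fun k => pvPref x (k + 1))).count p
      = if p.toList <+: x.toList ∧ p.toList.length ≤ n then 1 else 0 := by
  intro n
  induction n with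
  | zero =>
    intro _
    rw [if_neg (fun hh => by omega)]
    simp
  | succ n ih =>
    intro hn
    rw [List.range_succ, List.map_append, List.count_append, ih (by omega)]
    have hsing : List.count p (List.map (fun k => pvPref x (k + 1)) [n])
        = if pvPref x (n + 1) = p then 1 else 0 := by
      simp [List.count_cons, beq_iff_eq]
    rw [hsing]
    simp only [pvPref_eq_iff x p n (show n < x.toList.length by omega)]
    by_cases hpre : p.toList <+: x.toList
    · simp only [hpre, and_true, true_and]
      split_ifs <;> omega
    · simp [hpre]

-- event count of a nonempty prefix = number of elements it is a prefix of
theorem pvCnt_events (items : List String) (p : String) (hp : p.toList ≠ []) :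
    pvCnt (pvEvents items) p = items.countP (fun y => decide (p.toList <+: y.toList)) := by
  have hp1 : 1 ≤ p.toList.length := List.length_pos_iff.mpr hp
  induction items with
  | nil => rfl
  | cons x rest ih =>
    unfold pvCnt pvEvents
    rw [List.flatMap_cons, List.map_append, List.count_append, List.countP_cons,
      List.map_map]
    have hcomp : (Prod.fst ∘ fun k : Nat => (pvPref x (k + 1), x))
        = fun k : Nat => pvPref x (k + 1) := rfl
    rw [hcomp, pvCnt_block x p hp1 x.toList.length (le_refl _)]
    have hite : (if p.toList <+: x.toList ∧ p.toList.length ≤ x.toList.length then 1 else 0)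
        = if decide (p.toList <+: x.toList) = true then 1 else 0 := by
      by_cases hpre : p.toList <+: x.toList
      · rw [if_pos ⟨hpre, hpre.length_le⟩, if_pos (by simpa using hpre)]
      · rw [if_neg (fun hh => hpre hh.1), if_neg (by simpa using hpre)]
    rw [hite]
    have ih' := ih
    unfold pvCnt pvEvents at ih'
    rw [ih']
    omega

-- the per-prefix glue: A's value and B's value agree
theorem pvVal_agree (items : List String) (p : String)
    (hp : p ∈ (pvEvents items).map Prod.fst) :
    pvAVal items (pvEvents items) p = pvBVal items p ((pvOwn (pvEvents items) p).getD "") := by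
  obtain ⟨ef, hef⟩ := Option.isSome_iff_exists.mp (pvOwn_isSome (pvEvents items) p hp)
  have hefp : ef.1 = p := by simpa using List.find?_some hef
  have hefmem : ef ∈ pvEvents items := List.mem_of_find?_eq_some hef
  have hown : pvOwn (pvEvents items) p = some ef.2 := by simp [pvOwn, hef]
  obtain ⟨y, hy, hee⟩ := List.mem_flatMap.mp hefmem
  obtain ⟨k, hk, hke⟩ := List.mem_map.mp hee
  rw [List.mem_range] at hk
  set x := ef.2 with hxdef
  have hxy : x = y := by rw [hxdef, ← hke]
  have hpx : p = pvPref y (k + 1) := by rw [← hefp, ← hke]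
  have hxl : x.toList.length = y.toList.length := by rw [hxy]
  have hptl : p.toList = x.toList.take (k + 1) := by rw [hpx, pvPref_toList, hxy]
  have hplen : p.toList.length = k + 1 := by
    rw [hptl, List.length_take]
    omega
  have hpre : p.toList <+: x.toList := by
    rw [hptl]
    exact List.take_prefix _ _
  have hxmem : x ∈ items := by rw [hxy]; exact hy
  have hp0 : p.toList ≠ [] := by
    intro hh
    rw [hh] at hplen
    simp at hplen
  have hcnt := pvCnt_events items p hp0
  have hsplit : items.countP (fun y => decide (p.toList <+: y.toList))
      = 1 + (items.erase x).countP (fun y => decide (p.toList <+: y.toList)) := by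
    rw [List.Perm.countP_eq _ (List.perm_cons_erase hxmem), List.countP_cons]
    simp only [decide_eq_true_eq]
    rw [if_pos hpre]
    omega
  have htk : x.toList.take p.toList.length = p.toList :=
    (List.prefix_iff_eq_take.mp hpre).symm
  have hiff := pvThrD_iff items x hxmem p.toList.length (by omega) (by omega)
  rw [htk] at hiff
  have hkey : pvCnt (pvEvents items) p = 1 ↔ ((p.toList.length : Int) > pvThrD items x) := by
    rw [hcnt, hsplit]
    constructor
    · intro hone
      have hzero : (items.erase x).countP (fun y => decide (p.toList <+: y.toList)) = 0 := by
        omega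
      by_contra hnot
      simp only [gt_iff_lt, not_lt] at hnot
      obtain ⟨y', hy', hpre'⟩ := hiff.mp hnot
      have := List.countP_eq_zero.mp hzero y' hy'
      simp only [decide_eq_true_eq] at this
      exact this hpre'
    · intro hgt
      have hzero : (items.erase x).countP (fun y => decide (p.toList <+: y.toList)) = 0 := by
        rw [List.countP_eq_zero]
        intro y' hy'
        simp only [decide_eq_true_eq]
        intro hpre'
        have := hiff.mpr ⟨y', hy', hpre'⟩
        omega
      omega
  rw [hown]
  unfold pvAVal pvBVal
  simp only [Option.getD_some]
  by_cases hone : pvCnt (pvEvents items) p = 1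
  · rw [if_pos hone, if_pos (hkey.mp hone), hown]
  · rw [if_neg hone, if_neg (fun hh => hone (hkey.mpr hh))]
    by_cases hmemp : p ∈ items
    · rw [if_pos (by simpa using hmemp),
        if_pos (by
          rw [PySem.Set.contains_eq_listContains]
          simpa [PySem.Set.mem_ofList] using hmemp)]
    · rw [if_neg (by simpa using hmemp),
        if_neg (by
          rw [PySem.Set.contains_eq_listContains]
          simpa [PySem.Set.mem_ofList] using hmemp)]

-- ===== VERDICT (by name: the statement is the Claim_ definition above) =====
theorem UniqueAbbreviation_spec : Claim_equal_UniqueAbbreviation := by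
  intro items _
  show UniqueAbbreviation items = UniqueAbbreviation_alt items
  rw [pvPortA_eq, pvPortB_eq, pvAInv, (pvBInv items (pvEvents items)).2,
    List.filterMap_map]
  refine List.filterMap_congr (fun p hp => ?_)
  have hp' : p ∈ (pvEvents items).map Prod.fst := (pvMem_dedup _ _).mp hp
  exact congrArg (fun o => Option.map (fun v => (p, v)) o) (pvVal_agree items p hp')
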